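-- pv_equiv track=rewrite | github.com/asigalov61/tegridymidi | tegridymidi/bits_and_ints.py | pitches_chord_to_int
-- ===== SOURCE A (Python) =====
-- def tones_chord_to_bits(chord, reverse=True):
--
--     bits = [0] * 12
--
--     for num in chord:
--         bits[num] = 1
--
--     if reverse:
--       bits.reverse()
--       return bits
--
--     else:
--       return bits
--
-- def shift_bits(bits, n):
--     return bits[-n:] + bits[:-n]
--
-- def bits_to_int(bits, shift_bits_value=0):
--     bits = shift_bits(bits, shift_bits_value)
--     result = 0
--     for bit in bits:
--         result = (result << 1) | bit
--
--     return result
--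
-- def pitches_chord_to_int(pitches_chord, tones_transpose_value=0):
--
--     pitches_chord = [x for x in pitches_chord if 0 < x < 128]
--
--     if not (-12 < tones_transpose_value < 12):
--       tones_transpose_value = 0
--
--     tones_chord = sorted(list(set([c % 12 for c in sorted(list(set(pitches_chord)))])))
--     bits = tones_chord_to_bits(tones_chord)
--     integer = bits_to_int(bits, shift_bits_value=tones_transpose_value)
--
--     return integer
-- ===== SOURCE B (Python) =====
-- def pitches_chord_to_int(pitches_chord, tones_transpose_value=0):
--
--     tones = {p % 12 for p in pitches_chord if 0 < p < 128}
--
--     mask = sum(2 ** t for t in tones)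
--
--     r = tones_transpose_value % 12 if -12 < tones_transpose_value < 12 else 0
--
--     q = mask // 2 ** r
--     s = mask % 2 ** r
--
--     return s * 2 ** (12 - r) + q
-- ===== Notes on version B (the rewrite author's own statement) =====
-- stated objective: simpler
-- what changed: Replaces the 12-slot bit list, list reverse, slice-based rotation and MSB-first bit-accumulation loop with direct integer arithmetic: a 12-bit mask built as the sum of 2**(p%12) over the set of in-range pitch classes, rotated by one divmod.
import Mathlib
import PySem

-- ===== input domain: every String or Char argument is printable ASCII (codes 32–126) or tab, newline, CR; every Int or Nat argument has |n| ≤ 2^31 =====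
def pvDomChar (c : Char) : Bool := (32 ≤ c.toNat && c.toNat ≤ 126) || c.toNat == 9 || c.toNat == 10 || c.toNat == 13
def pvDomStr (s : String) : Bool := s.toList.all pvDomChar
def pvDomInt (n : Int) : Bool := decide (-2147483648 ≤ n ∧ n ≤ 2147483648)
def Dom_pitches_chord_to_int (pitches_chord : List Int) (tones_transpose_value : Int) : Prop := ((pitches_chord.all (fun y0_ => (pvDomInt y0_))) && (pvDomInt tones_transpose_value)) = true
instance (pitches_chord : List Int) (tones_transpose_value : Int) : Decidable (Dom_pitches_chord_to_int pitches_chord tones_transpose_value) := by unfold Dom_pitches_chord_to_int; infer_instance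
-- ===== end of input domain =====

-- B replaces A's 12-slot bit list, reverse, slice rotation and MSB-first accumulation loop by
-- direct integer arithmetic on a 12-bit mask (sum of 2^(p%12) rotated by divmod); objective: simpler.

-- ===== PORT A =====
def tones_chord_to_bits (chord : List Int) (reverse : Bool) : List Int :=
  let bits := List.replicate 12 (0 : Int)
  -- bits[num] = 1; every num fed in by pitches_chord_to_int lies in 0..11, so the total
  -- form pySetD is exact here (Python would raise IndexError only outside that range)
  let bits := chord.foldl (fun b num => PySem.List.pySetD b num 1) bits
  if reverse then bits.reverse else bits

def shift_bits (bits : List Int) (n : Int) : List Int :=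
  PySem.List.slice bits (some (-n)) none ++ PySem.List.slice bits none (some (-n))

def bits_to_int (bits : List Int) (shift_bits_value : Int) : Int :=
  let bits := shift_bits bits shift_bits_value
  bits.foldl (fun result bit => PySem.Int.bor (result <<< (1 : Nat)) bit) 0

def pitches_chord_to_int (pitches_chord : List Int) (tones_transpose_value : Int) : Int :=
  let pitches_chord := pitches_chord.filter (fun x => 0 < x && x < 128)
  let tones_transpose_value :=
    if ¬(-12 < tones_transpose_value ∧ tones_transpose_value < 12) then 0 else tones_transpose_value
  let tones_chord := PySem.List.sorted
      (PySem.Set.ofList ((PySem.List.sorted (PySem.Set.ofList pitches_chord) (fun x => x) false).map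
        (fun c => PySem.Int.mod c 12))) (fun x => x) false
  let bits := tones_chord_to_bits tones_chord true
  let integer := bits_to_int bits tones_transpose_value
  integer

-- ===== PORT B =====
def pitches_chord_to_int_alt (pitches_chord : List Int) (tones_transpose_value : Int) : Int :=
  let tones : PySem.Set Int :=
    pitches_chord.foldl
      (fun s p => if 0 < p && p < 128 then PySem.Set.add s (PySem.Int.mod p 12) else s)
      PySem.Set.empty
  -- sum over the set: order-independent, so folding the Set's list is exact
  let mask := tones.foldl (fun acc t => acc + 2 ^ t.toNat) 0
  let r := if -12 < tones_transpose_value ∧ tones_transpose_value < 12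
           then PySem.Int.mod tones_transpose_value 12 else 0
  let q := PySem.Int.floordiv mask (2 ^ r.toNat)
  let s := PySem.Int.mod mask (2 ^ r.toNat)
  s * 2 ^ ((12 : Int) - r).toNat + q

-- ===== PRECONDITION & SPEC =====
def Spec_pitches_chord_to_int (pitches_chord : List Int) (tones_transpose_value : Int) (out : Int) : Prop := out = pitches_chord_to_int_alt pitches_chord tones_transpose_value
instance (pitches_chord : List Int) (tones_transpose_value : Int) (out : Int) : Decidable (Spec_pitches_chord_to_int pitches_chord tones_transpose_value out) := by unfold Spec_pitches_chord_to_int; infer_instance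

-- ===== CLAIM (what is proved, stated in full; the proofs are below) =====
def Claim_equal_pitches_chord_to_int : Prop := ∀ (pitches_chord : List Int) (tones_transpose_value : Int), Dom_pitches_chord_to_int pitches_chord tones_transpose_value → Spec_pitches_chord_to_int pitches_chord tones_transpose_value (pitches_chord_to_int pitches_chord tones_transpose_value)

-- ===== LEMMAS AND PROOFS =====

lemma or_one_double (m : Nat) : (2 * m) ||| 1 = 2 * m + 1 := by
  have h := Nat.lor_bit false m true 0
  simp [Nat.bit] at h
  simpa [Nat.bit, Nat.two_mul, Nat.mul_comm] using h

lemma bor_step (r b : Int) (hr : 0 ≤ r) (hb : b = 0 ∨ b = 1) :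
    PySem.Int.bor (r <<< (1 : Nat)) b = 2 * r + b := by
  have hsl : r <<< (1 : Nat) = 2 * r := by
    rw [Int.shiftLeft_eq]; ring
  rcases hb with hb | hb <;> subst hb
  · simp [hsl]
  · rw [PySem.Int.bor_of_nonneg (by omega) (by omega)]
    rw [hsl]
    have h1 : (2 * r).toNat = 2 * r.toNat := by omega
    have h2 : (1 : Int).toNat = 1 := rfl
    rw [h1, h2, or_one_double]
    omega

lemma fold_bor (bits : List Int) (acc : Int) (h : ∀ b ∈ bits, b = 0 ∨ b = 1) (hacc : 0 ≤ acc) :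
    bits.foldl (fun r b => PySem.Int.bor (r <<< (1 : Nat)) b) acc
      = bits.foldl (fun r b => 2 * r + b) acc := by
  induction bits generalizing acc with
  | nil => rfl
  | cons b rest ih =>
    have hb := h b (by simp)
    simp only [List.foldl_cons]
    rw [bor_step _ _ hacc hb, ih _ (fun x hx => h x (List.mem_cons_of_mem _ hx)) (by omega)]

lemma bits_char (tones : List Int) (h : ∀ t ∈ tones, 0 ≤ t ∧ t < 12) (start : List Int) (hs : start.length = 12) :
    tones.foldl (fun b num => PySem.List.pySetD b num 1) start
      = (List.range 12).map (fun k => if ((k : Nat) : Int) ∈ tones then 1 else start.getD k 0) := by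
  induction tones generalizing start with
  | nil =>
    simp only [List.foldl_nil, List.not_mem_nil, if_false]
    apply List.ext_getElem
    · simp [hs]
    · intro k h1 h2
      simp [List.getD_eq_getElem?_getD, h1]
  | cons t rest ih =>
    simp only [List.foldl_cons]
    obtain ⟨ht0, ht12⟩ := h t (by simp)
    rw [PySem.List.pySetD_of_nonneg (h := ht0)]
    rw [ih (fun x hx => h x (by simp [hx])) _ (by simp [hs])]
    apply List.map_congr_left
    intro k hk
    simp only [List.mem_range] at hk
    by_cases hkr : ((k : Nat) : Int) ∈ rest
    · simp [hkr, List.mem_cons]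
    · by_cases hkt : ((k : Nat) : Int) = t
      · have : k = t.toNat := by omega
        subst this
        simp [hkt, List.mem_cons, List.getD_eq_getElem?_getD,
          show t.toNat < start.length by omega]
      · simp only [hkr, hkt, List.mem_cons, or_self, if_false, List.getD_eq_getElem?_getD,
          List.getElem?_set]
        rw [if_neg (by omega)]

lemma bits_char' (tones : List Int) (h : ∀ t ∈ tones, 0 ≤ t ∧ t < 12) :
    tones.foldl (fun b num => PySem.List.pySetD b num 1) (List.replicate 12 (0 : Int))
      = (List.range 12).map (fun k => if ((k : Nat) : Int) ∈ tones then 1 else 0) := by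
  rw [bits_char tones h _ (by simp)]
  apply List.map_congr_left
  intro k hk
  simp only [List.mem_range] at hk
  by_cases hm : ((k : Nat) : Int) ∈ tones
  · simp [hm]
  · simp only [hm, if_false, List.getD_eq_getElem?_getD]
    interval_cases k <;> rfl

lemma mask_char (tones : List Int) (hr : ∀ t ∈ tones, 0 ≤ t ∧ t < 12) (hnd : tones.Nodup) :
    tones.foldl (fun acc t => acc + 2 ^ t.toNat) 0
      = ((List.range 12).map (fun k => (if ((k : Nat) : Int) ∈ tones then (1 : Int) else 0) * 2 ^ k)).sum := by
  rw [PySem.List.foldl_add tones (fun t => (2 : Int) ^ t.toNat) 0, zero_add]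
  induction tones with
  | nil => simp
  | cons t rest ih =>
    obtain ⟨ht0, ht12⟩ := hr t (by simp)
    rw [List.map_cons, List.sum_cons,
      ih (fun x hx => hr x (by simp [hx])) (List.Nodup.of_cons hnd)]
    have htr : t ∉ rest := (List.nodup_cons.mp hnd).1
    interval_cases t <;> simp [List.range_succ, List.mem_cons, htr] <;> ring

lemma core2 (c : Nat → Int) (hc : ∀ k, c k = 0 ∨ c k = 1) (v : Int)
    (hv1 : -12 < v) (hv2 : v < 12) :
    bits_to_int (((List.range 12).map c).reverse) v
      = PySem.Int.mod (((List.range 12).map (fun k => c k * 2 ^ k)).sum)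
            (2 ^ (PySem.Int.mod v 12).toNat) * 2 ^ ((12 : Int) - PySem.Int.mod v 12).toNat
        + PySem.Int.floordiv (((List.range 12).map (fun k => c k * 2 ^ k)).sum)
            (2 ^ (PySem.Int.mod v 12).toNat) := by
  have hb : ∀ k, 0 ≤ c k ∧ c k ≤ 1 := fun k => by rcases hc k with h | h <;> simp [h]
  have h0 := hb 0; have h1 := hb 1; have h2 := hb 2; have h3 := hb 3
  have h4 := hb 4; have h5 := hb 5; have h6 := hb 6; have h7 := hb 7
  have h8 := hb 8; have h9 := hb 9; have h10 := hb 10; have h11 := hb 11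
  clear hb
  unfold bits_to_int shift_bits
  rw [fold_bor _ _ (by
    intro b hb
    rcases List.mem_append.mp hb with hb' | hb' <;>
      · have hmem := PySem.List.mem_of_mem_slice _ _ _ hb'
        rw [List.mem_reverse] at hmem
        obtain ⟨k, -, rfl⟩ := List.mem_map.mp hmem
        exact hc k) le_rfl]
  rw [PySem.Int.mod_eq_emod_of_pos (show (0 : Int) < 12 by norm_num)]
  clear hc
  interval_cases v <;>
    · simp only [PySem.List.slice, PySem.List.clampIdx, List.length_reverse, List.length_map,
        List.length_range]
      norm_num
      simp [List.range_succ, List.foldl]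
      try omega

lemma core (T S : List Int) (hmem : ∀ t, t ∈ T ↔ t ∈ S) (hT : ∀ t ∈ T, 0 ≤ t ∧ t < 12)
    (hS : ∀ t ∈ S, 0 ≤ t ∧ t < 12) (hnd : S.Nodup) (v : Int) (hv1 : -12 < v) (hv2 : v < 12) :
    bits_to_int (tones_chord_to_bits T true) v
      = PySem.Int.mod (S.foldl (fun acc t => acc + 2 ^ t.toNat) 0)
            (2 ^ (PySem.Int.mod v 12).toNat) * 2 ^ ((12 : Int) - PySem.Int.mod v 12).toNat
        + PySem.Int.floordiv (S.foldl (fun acc t => acc + 2 ^ t.toNat) 0)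
            (2 ^ (PySem.Int.mod v 12).toNat) := by
  unfold tones_chord_to_bits
  simp only [if_true]
  rw [bits_char' T hT]
  simp only [hmem]
  rw [mask_char S hS hnd]
  exact core2 (fun k => if ((k : Nat) : Int) ∈ S then 1 else 0)
    (fun k => by by_cases h : ((k : Nat) : Int) ∈ S <;> simp [h]) v hv1 hv2

-- ===== VERDICT (by name: the statement is the Claim_ definition above) =====
theorem pitches_chord_to_int_spec : Claim_equal_pitches_chord_to_int := by
  intro pc v _
  unfold Spec_pitches_chord_to_int pitches_chord_to_int pitches_chord_to_int_alt
  -- the two tone collections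
  set filt := pc.filter (fun x => 0 < x && x < 128) with hfilt
  have hB : pc.foldl
      (fun s p => if 0 < p && p < 128 then PySem.Set.add s (PySem.Int.mod p 12) else s)
      PySem.Set.empty
      = PySem.Set.ofList (filt.map (fun p => PySem.Int.mod p 12)) := by
    rw [PySem.List.foldl_if_eq_foldl_filter (fun x => 0 < x && x < 128)
      (fun s p => PySem.Set.add s (PySem.Int.mod p 12)) pc PySem.Set.empty]
    rw [← List.foldl_map, PySem.Set.ofList_eq_foldl]
    rfl
  rw [hB]
  set S := PySem.Set.ofList (filt.map (fun p => PySem.Int.mod p 12)) with hSdef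
  set T := PySem.List.sorted
      (PySem.Set.ofList ((PySem.List.sorted (PySem.Set.ofList filt) (fun x => x) false).map
        (fun c => PySem.Int.mod c 12))) (fun x => x) false with hTdef
  have hmem : ∀ t, t ∈ T ↔ t ∈ S := by
    intro t
    rw [hTdef, hSdef,
      (PySem.List.sorted_perm _ _ _).mem_iff, PySem.Set.mem_ofList, PySem.Set.mem_ofList,
      List.mem_map, List.mem_map]
    constructor
    · rintro ⟨p, hp, rfl⟩
      exact ⟨p, by
        have := (PySem.List.sorted_perm (PySem.Set.ofList filt) (fun x => x) false).mem_iff.mp hp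
        exact (PySem.Set.mem_ofList _ _).mp this, rfl⟩
    · rintro ⟨p, hp, rfl⟩
      exact ⟨p, by
        rw [(PySem.List.sorted_perm (PySem.Set.ofList filt) (fun x => x) false).mem_iff,
          PySem.Set.mem_ofList]
        exact hp, rfl⟩
  have hS : ∀ t ∈ S, 0 ≤ t ∧ t < 12 := by
    intro t ht
    rw [hSdef, PySem.Set.mem_ofList, List.mem_map] at ht
    obtain ⟨p, -, rfl⟩ := ht
    exact ⟨PySem.Int.mod_nonneg p (by norm_num), PySem.Int.mod_lt p (by norm_num)⟩
  have hT : ∀ t ∈ T, 0 ≤ t ∧ t < 12 := fun t ht => hS t ((hmem t).mp ht)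
  have hnd : S.Nodup := by rw [hSdef]; exact PySem.Set.nodup_ofList _
  by_cases hin : -12 < v ∧ v < 12
  · simp only [hin, not_true, if_false, if_true, and_self]
    exact core T S hmem hT hS hnd v hin.1 hin.2
  · simp only [hin, not_false_iff, if_true, if_false]
    have h0 : PySem.Int.mod 0 12 = 0 := by decide
    have := core T S hmem hT hS hnd 0 (by norm_num) (by norm_num)
    rw [h0] at this
    exact this
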